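-- pv_equiv track=rewrite | github.com/SachinHg/python-exercises | pytha.py | chocolates
-- ===== SOURCE A (Python) =====
-- def chocolates(A,m):
-- 	A = sorted(A)
-- 	i = 0
-- 	min_diff = 99999999
-- 	while i+m-1 < len(A):
-- 		diff = A[i+m-1]-A[i]
-- 		if diff < min_diff:
-- 			min_diff = diff
-- 			first = i
-- 			last = i+m-1
-- 		i+=1
-- 	diff_res = 0
-- 	A_res = A[first:last+1]
-- 	for ii in range(len(A_res)-1,0,-1):
-- 		for jj in range(ii-1,-1,-1):
-- 			diff_res+=A_res[ii]-A_res[jj]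
-- 	return diff_res
-- ===== SOURCE B (Python) =====
-- def chocolates(A, m):
--     A = sorted(A)
--     best = min(range(len(A) - m + 1), key=lambda i: A[i + m - 1] - A[i])
--     w = A[best:best + m]
--     return sum(v * (2 * k - (m - 1)) for k, v in enumerate(w))
-- ===== Notes on version B (the rewrite author's own statement) =====
-- stated objective: faster
-- what changed: B computes the pairwise-difference total of the best window with the closed linear formula sum w[k]*(2k-(m-1)) over the sorted window instead of A's O(m^2) double loop, and finds the best window with min() over the index range with a key instead of A's hand-rolled while-scan.
import Mathlib
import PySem

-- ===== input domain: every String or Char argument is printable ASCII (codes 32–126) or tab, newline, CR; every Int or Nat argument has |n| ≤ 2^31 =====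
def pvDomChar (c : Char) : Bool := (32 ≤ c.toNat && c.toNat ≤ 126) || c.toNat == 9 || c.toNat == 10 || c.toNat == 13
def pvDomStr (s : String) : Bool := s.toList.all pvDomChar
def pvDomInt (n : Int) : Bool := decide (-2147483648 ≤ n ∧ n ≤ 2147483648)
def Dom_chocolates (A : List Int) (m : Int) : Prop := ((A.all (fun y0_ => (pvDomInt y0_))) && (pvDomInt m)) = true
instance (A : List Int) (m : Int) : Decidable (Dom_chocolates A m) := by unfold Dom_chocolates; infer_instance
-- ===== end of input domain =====

-- B replaces A's O(m^2) double loop over the chosen window by the closed linear form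
-- sum w[k]*(2k-(m-1)) and A's hand-rolled scan by min() with a key.


-- ===== PORT A =====
-- the while-loop: state (min_diff, first/last as an Option pair; none = not yet assigned)
def chocoLoop (A : List Int) (m : Int) (minDiff : Int) (fl : Option (Int × Int)) (i : Int) :
    Int × Option (Int × Int) :=
  if _h : i + m - 1 < (A.length : Int) then
    match PySem.List.pyGet? A (i + m - 1), PySem.List.pyGet? A i with
    | some x, some y =>
        if x - y < minDiff then chocoLoop A m (x - y) (some (i, i + m - 1)) (i + 1)
        else chocoLoop A m minDiff fl (i + 1)
    | _, _ => (minDiff, fl)   -- Python raises IndexError here (reachable only for m ≤ 0, outside Pre_)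
  else (minDiff, fl)
termination_by ((A.length : Int) - (i + m - 1)).toNat
decreasing_by all_goals omega

-- the two nested for-loops over A_res
def chocoPairLoop (w : List Int) : Int :=
  (PySem.List.pyRange ((w.length : Int) - 1) 0 (-1)).foldl (fun acc ii =>
    (PySem.List.pyRange (ii - 1) (-1) (-1)).foldl (fun acc2 jj =>
      acc2 + (PySem.List.pyGetD w ii 0 - PySem.List.pyGetD w jj 0)) acc) 0

def chocolates (A : List Int) (m : Int) : Int :=
  let As := PySem.List.sorted A (fun x => x) false
  match (chocoLoop As m 99999999 none 0).2 with
  | some fl => chocoPairLoop (PySem.List.slice As (some fl.1) (some (fl.2 + 1)))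
  | none => 0   -- 'first' was never assigned: Python raises NameError (outside Pre_)

-- ===== PORT B =====
def chocolates_alt (A : List Int) (m : Int) : Int :=
  let As := PySem.List.sorted A (fun x => x) false
  match PySem.List.min? (PySem.List.pyRange 0 ((As.length : Int) - m + 1) 1)
      (fun i => PySem.List.pyGetD As (i + m - 1) 0 - PySem.List.pyGetD As i 0) with
  | some best =>
      let w := PySem.List.slice As (some best) (some (best + m))
      (PySem.List.enumerate w 0).foldl (fun acc kv => acc + kv.2 * (2 * kv.1 - (m - 1))) 0
  | none => 0   -- min() of an empty range: Python raises ValueError (outside Pre_)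

-- ===== PRECONDITION & SPEC =====
-- Pre_ is exactly where the Python A returns: 1 ≤ m ≤ len(A) (otherwise 'first' is unbound or
-- an index is out of range) and some sorted window of width m has spread below the 99999999
-- sentinel (otherwise 'first' is never assigned and A raises NameError).
def Pre_chocolates (A : List Int) (m : Int) : Prop :=
  1 ≤ m ∧ m ≤ (A.length : Int) ∧
  ∃ i < A.length, i + m.toNat ≤ A.length ∧
    (PySem.List.sorted A (fun x => x) false).getD (i + m.toNat - 1) 0
      - (PySem.List.sorted A (fun x => x) false).getD i 0 < 99999999
instance (A : List Int) (m : Int) : Decidable (Pre_chocolates A m) := by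
  unfold Pre_chocolates; infer_instance

def pvWitness_chocolates : List Int × Int := ([3, 1, 7, 2], 2)

def Spec_chocolates (A : List Int) (m : Int) (out : Int) : Prop := out = chocolates_alt A m
instance (A : List Int) (m : Int) (out : Int) : Decidable (Spec_chocolates A m out) := by
  unfold Spec_chocolates; infer_instance

-- ===== CLAIM (what is proved, stated in full; the proofs are below) =====
def Claim_equal_chocolates : Prop := ∀ (A : List Int) (m : Int), Dom_chocolates A m → Pre_chocolates A m → Spec_chocolates A m (chocolates A m)

-- ===== LEMMAS AND PROOFS =====

theorem pvGet_some (S : List Int) (t : Int) (h0 : 0 ≤ t) (h1 : t < (S.length : Int)) :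
    PySem.List.pyGet? S t = some (PySem.List.pyGetD S t 0) := by
  unfold PySem.List.pyGetD PySem.List.pyGet? PySem.List.pyIdx?
  simp only [if_pos h0, if_pos h1, Option.bind_some]
  rw [List.getElem?_eq_getElem (by omega)]
  rfl

def pvKey (S : List Int) (m : Int) (j : Int) : Int :=
  PySem.List.pyGetD S (j + m - 1) 0 - PySem.List.pyGetD S j 0

def pvAStep (k : Int → Int) (m : Int) (s : Int × Option (Int × Int)) (j : Int) :
    Int × Option (Int × Int) :=
  if k j < s.1 then (k j, some (j, j + m - 1)) else s

def pvMStep (k : Int → Int) (acc : Option Int) (x : Int) : Option Int :=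
  match acc with
  | none => some x
  | some mm => if k x < k mm then some x else some mm

theorem pvMin?_eq (xs : List Int) (key : Int → Int) :
    PySem.List.min? xs key = xs.foldl (pvMStep key) none := by
  unfold PySem.List.min?
  congr 1
  funext acc x
  cases acc <;> rfl

theorem chocoLoop_eq_foldl (S : List Int) (m : Int) (hm : 1 ≤ m) :
    ∀ (fuel : Nat) (i md : Int) (fl : Option (Int × Int)), 0 ≤ i →
      ((S.length : Int) - i).toNat ≤ fuel →
      chocoLoop S m md fl i =
        (PySem.List.pyRange i ((S.length : Int) - m + 1) 1).foldl (pvAStep (pvKey S m) m) (md, fl) := by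
  intro fuel
  induction fuel with
  | zero =>
      intro i md fl hi hf
      have h : ¬ (i + m - 1 < (S.length : Int)) := by omega
      rw [chocoLoop, dif_neg h, PySem.List.pyRange_one_eq_nil (by omega)]
      rfl
  | succ f ih =>
      intro i md fl hi hf
      by_cases h : i + m - 1 < (S.length : Int)
      · rw [chocoLoop, dif_pos h,
          pvGet_some S (i + m - 1) (by omega) (by omega),
          pvGet_some S i (by omega) (by omega),
          PySem.List.pyRange_one_cons (by omega : i < (S.length : Int) - m + 1)]
        simp only [List.foldl_cons]
        by_cases hlt : PySem.List.pyGetD S (i + m - 1) 0 - PySem.List.pyGetD S i 0 < md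
        · rw [if_pos hlt, ih (i + 1) _ _ (by omega) (by omega)]
          simp only [pvAStep, pvKey, if_pos hlt]
        · rw [if_neg hlt, ih (i + 1) _ _ (by omega) (by omega)]
          simp only [pvAStep, pvKey, if_neg hlt]
      · rw [chocoLoop, dif_neg h, PySem.List.pyRange_one_eq_nil (by omega)]
        rfl

-- the relation maintained between A's loop state and min?'s accumulator
def pvInv (k : Int → Int) (m : Int) (s : Int × Option (Int × Int)) (acc : Option Int) : Prop :=
  (s.1 < 99999999 → ∃ j, s.2 = some (j, j + m - 1) ∧ acc = some j ∧ k j = s.1) ∧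
  (¬ s.1 < 99999999 → s.1 = 99999999 ∧ s.2 = none ∧ ∀ j, acc = some j → ¬ k j < 99999999)

theorem pvInv_foldl (k : Int → Int) (m : Int) :
    ∀ (xs : List Int) (s : Int × Option (Int × Int)) (acc : Option Int),
      pvInv k m s acc → pvInv k m (xs.foldl (pvAStep k m) s) (xs.foldl (pvMStep k) acc) := by
  intro xs
  induction xs with
  | nil => intro s acc h; exact h
  | cons x t ih =>
      intro s acc h
      simp only [List.foldl_cons]
      apply ih
      obtain ⟨h1, h2⟩ := h
      have hs1 : s.1 ≤ 99999999 := by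
        by_cases hs : s.1 < 99999999
        · omega
        · exact le_of_eq (h2 hs).1
      by_cases hx : k x < s.1
      · have hA : pvAStep k m s x = (k x, some (x, x + m - 1)) := by simp [pvAStep, hx]
        have hacc : pvMStep k acc x = some x := by
          cases acc with
          | none => rfl
          | some j =>
              have hkxj : k x < k j := by
                by_cases hs : s.1 < 99999999
                · obtain ⟨j', _, hj, hkj⟩ := h1 hs
                  injection hj with hjj
                  subst hjj
                  omega
                · have := (h2 hs).2.2 j rfl
                  omega
              simp [pvMStep, hkxj]
        rw [hA, hacc]
        constructor
        · intro _
          exact ⟨x, rfl, rfl, rfl⟩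
        · intro hcon
          simp only at hcon
          omega
      · have hA : pvAStep k m s x = s := by simp [pvAStep, hx]
        rw [hA]
        by_cases hs : s.1 < 99999999
        · obtain ⟨j, hfl, hj, hkj⟩ := h1 hs
          have hacc : pvMStep k acc x = acc := by
            rw [hj]
            simp only [pvMStep]
            rw [if_neg (by omega : ¬ k x < k j)]
          rw [hacc]
          exact ⟨h1, h2⟩
        · obtain ⟨hse, hfl, hall⟩ := h2 hs
          refine ⟨fun hc => absurd hc hs, fun _ => ⟨hse, hfl, ?_⟩⟩
          intro j hj
          cases acc with
          | none =>
              simp only [pvMStep] at hj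
              injection hj with hh
              subst hh
              omega
          | some j0 =>
              have hj0 := hall j0 rfl
              simp only [pvMStep] at hj
              split at hj <;> injection hj with hh
              · subst hh; omega
              · exact hh ▸ hj0

theorem pvA_fst_le (k : Int → Int) (m : Int) :
    ∀ (xs : List Int) (s : Int × Option (Int × Int)), (xs.foldl (pvAStep k m) s).1 ≤ s.1 := by
  intro xs
  induction xs with
  | nil => intro s; simp
  | cons x t ih =>
      intro s
      simp only [List.foldl_cons]
      refine le_trans (ih _) ?_
      by_cases hx : k x < s.1 <;> simp [pvAStep, hx]
      omega

theorem pvA_fst_le_mem (k : Int → Int) (m : Int) :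
    ∀ (xs : List Int) (s : Int × Option (Int × Int)) (x : Int), x ∈ xs →
      (xs.foldl (pvAStep k m) s).1 ≤ k x := by
  intro xs
  induction xs with
  | nil => intro s x hx; simp at hx
  | cons y t ih =>
      intro s x hx
      rcases List.mem_cons.mp hx with h | h
      · subst h
        simp only [List.foldl_cons]
        refine le_trans (pvA_fst_le k m t _) ?_
        by_cases hx' : k x < s.1 <;> simp [pvAStep, hx']
        omega
      · simp only [List.foldl_cons]
        exact ih _ x h

-- Σ w[k] * 2*(s+k), structurally
def pvPw : List Int → Int → Int
  | [], _ => 0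
  | x :: t, s => 2 * s * x + pvPw t (s + 1)

theorem pvEnumFoldl (c : Int) :
    ∀ (w : List Int) (s acc : Int),
      (PySem.List.enumerate w s).foldl (fun a kv => a + kv.2 * (2 * kv.1 - c)) acc =
        acc + pvPw w s - c * w.sum := by
  intro w
  induction w with
  | nil => intro s acc; simp [PySem.List.enumerate, pvPw]
  | cons x t ih =>
      intro s acc
      rw [PySem.List.enumerate_cons, List.foldl_cons, ih]
      simp [pvPw]
      ring

theorem pvPw_append (xs : List Int) (x : Int) :
    ∀ s : Int, pvPw (xs ++ [x]) s = pvPw xs s + 2 * (s + xs.length) * x := by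
  induction xs with
  | nil => intro s; simp [pvPw]
  | cons y t ih =>
      intro s
      simp only [List.cons_append, pvPw, ih (s + 1), List.length_cons]
      push_cast
      ring

-- the inner for-loop: jj runs ii-1 … 0
theorem pvInner (w : List Int) (v : Int) :
    ∀ (j : Nat) (acc : Int), j ≤ w.length →
      (PySem.List.pyRange ((j : Int) - 1) (-1) (-1)).foldl
          (fun a2 jj => a2 + (v - PySem.List.pyGetD w jj 0)) acc =
        acc + j * v - (w.take j).sum := by
  intro j
  induction j with
  | zero =>
      intro acc _
      rw [PySem.List.pyRange_neg_one_eq_nil (by omega)]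
      simp
  | succ n ih =>
      intro acc hn
      have hcons : PySem.List.pyRange (((n + 1 : Nat) : Int) - 1) (-1) (-1) =
          ((n : Int)) :: PySem.List.pyRange ((n : Int) - 1) (-1) (-1) := by
        rw [show (((n + 1 : Nat) : Int) - 1) = (n : Int) by push_cast; ring]
        exact PySem.List.pyRange_neg_one_cons (by omega)
      rw [hcons, List.foldl_cons, ih _ (by omega)]
      rw [PySem.List.pyGetD_natCast]
      have hsum : (w.take (n + 1)).sum = (w.take n).sum + w.getD n 0 := by
        rw [List.take_add_one, List.sum_append]
        rw [List.getElem?_eq_getElem (by omega)]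
        simp [List.getD, List.getElem?_eq_getElem (show n < w.length by omega)]
      rw [hsum]
      push_cast
      ring

-- A's outer loop value, accumulated from index 0 up to t-1
def pvG (w : List Int) : Nat → Int
  | 0 => 0
  | t + 1 => pvG w t + ((t : Int) * w.getD t 0 - (w.take t).sum)

theorem pvOuter (w : List Int) :
    ∀ (t : Nat) (acc : Int), t ≤ w.length →
      (PySem.List.pyRange ((t : Int) - 1) 0 (-1)).foldl
          (fun acc ii =>
            (PySem.List.pyRange (ii - 1) (-1) (-1)).foldl
              (fun acc2 jj => acc2 + (PySem.List.pyGetD w ii 0 - PySem.List.pyGetD w jj 0)) acc)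
          acc =
        acc + pvG w t := by
  intro t
  induction t with
  | zero =>
      intro acc _
      rw [PySem.List.pyRange_neg_one_eq_nil (by omega)]
      simp [pvG]
  | succ n ih =>
      intro acc hn
      rcases Nat.eq_zero_or_pos n with h0 | hpos
      · subst h0
        rw [PySem.List.pyRange_neg_one_eq_nil (by omega)]
        simp [pvG]
      · have hcons : PySem.List.pyRange (((n + 1 : Nat) : Int) - 1) 0 (-1) =
            ((n : Int)) :: PySem.List.pyRange ((n : Int) - 1) 0 (-1) := by
          rw [show (((n + 1 : Nat) : Int) - 1) = (n : Int) by push_cast; ring]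
          exact PySem.List.pyRange_neg_one_cons (by omega)
        rw [hcons, List.foldl_cons, pvInner w _ n _ (by omega), ih _ (by omega)]
        rw [PySem.List.pyGetD_natCast]
        simp only [pvG]
        ring

theorem pvG_closed (w : List Int) :
    ∀ t : Nat, t ≤ w.length →
      pvG w t = pvPw (w.take t) 0 - ((t : Int) - 1) * (w.take t).sum := by
  intro t
  induction t with
  | zero => simp [pvG, pvPw]
  | succ n ih =>
      intro hn
      have htake : w.take (n + 1) = w.take n ++ [w.getD n 0] := by
        rw [List.take_add_one]
        rw [List.getElem?_eq_getElem (by omega)]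
        simp [List.getD, List.getElem?_eq_getElem (show n < w.length by omega)]
      rw [pvG, ih (by omega), htake, pvPw_append, List.sum_append]
      rw [List.length_take, min_eq_left (by omega)]
      simp only [List.sum_cons, List.sum_nil]
      push_cast
      ring

theorem pvPairLoop (w : List Int) :
    chocoPairLoop w = pvPw w 0 - ((w.length : Int) - 1) * w.sum := by
  unfold chocoPairLoop
  rw [pvOuter w w.length 0 le_rfl, pvG_closed w w.length le_rfl, List.take_length]
  ring

-- ===== VERDICT (by name: the statement is the Claim_ definition above) =====
theorem chocolates_spec : Claim_equal_chocolates := by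
  intro A m _ hPre
  obtain ⟨hm1, hm2, i0, hi0lt, hi0le, hkey⟩ := hPre
  unfold Spec_chocolates chocolates chocolates_alt
  simp only []
  set S := PySem.List.sorted A (fun x => x) false with hS
  have hlen : S.length = A.length := PySem.List.length_sorted A _ false
  set R := PySem.List.pyRange 0 ((S.length : Int) - m + 1) 1 with hRdef
  have hR := chocoLoop_eq_foldl S m hm1 ((S.length : Int)).toNat 0 99999999 none le_rfl (by omega)
  have hInv0 : pvInv (pvKey S m) m (99999999, none) none := by
    refine ⟨fun h => absurd h (by simp), fun _ => ⟨rfl, rfl, fun j hj => by simp at hj⟩⟩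
  have hInv := pvInv_foldl (pvKey S m) m R _ _ hInv0
  have hmem : ((i0 : Int)) ∈ R := by
    rw [hRdef, PySem.List.mem_pyRange_one]
    omega
  have hklt : pvKey S m (i0 : Int) < 99999999 := by
    unfold pvKey
    rw [show ((i0 : Int) + m - 1) = ((i0 + m.toNat - 1 : Nat) : Int) by omega,
      PySem.List.pyGetD_natCast, PySem.List.pyGetD_natCast]
    exact hkey
  have hfst : (R.foldl (pvAStep (pvKey S m) m) (99999999, none)).1 < 99999999 :=
    lt_of_le_of_lt (pvA_fst_le_mem _ _ R _ _ hmem) hklt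
  obtain ⟨b, hfl, hacc, hkb⟩ := hInv.1 hfst
  have hk : (fun i => PySem.List.pyGetD S (i + m - 1) 0 - PySem.List.pyGetD S i 0) = pvKey S m := rfl
  have hbR : b ∈ R := by
    have := PySem.List.min?_mem (xs := R) (key := pvKey S m)
      (by rw [pvMin?_eq, hacc] : PySem.List.min? R (pvKey S m) = some b)
    exact this
  have hb1 : 0 ≤ b ∧ b < (S.length : Int) - m + 1 := by
    rw [hRdef, PySem.List.mem_pyRange_one] at hbR
    exact hbR
  rw [hR, hfl, hk, pvMin?_eq, hacc]
  simp only []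
  have hbm : b + m - 1 + 1 = b + m := by ring
  rw [hbm]
  set w := PySem.List.slice S (some b) (some (b + m)) with hw
  have hwlen : (w.length : Int) = m := by
    rw [hw, PySem.List.slice_toNat S (by omega) (by omega)]
    simp only [List.length_take, List.length_drop]
    omega
  rw [pvEnumFoldl, pvPairLoop, hwlen]
  ring
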